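-- pv_equiv track=rewrite | github.com/GuanH/DRL-Assignment-2 | train2048.py | rot_flip_pattern
-- ===== SOURCE A (Python) =====
-- import copy
--
-- def rot_flip_pattern(p, t):
--     tem = copy.deepcopy(p)
--     if t >= 4:
--         for i in range(len(tem)):
--             tem[i] = (tem[i][0], 3 - tem[i][1])
--         t %= 4
--     for i in range(t):
--         for j in range(len(tem)):
--             tem[j] = (tem[j][1], 3 - tem[j][0])
--     return tem
-- ===== SOURCE B (Python) =====
-- import copy
--
-- def rot_flip_pattern(p, t):
--     tem = copy.deepcopy(p)
--     flip = t >= 4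
--     r = t % 4 if flip else (t if 0 < t < 4 else 0)
--     if flip:
--         tem = [(x, 3 - y) for (x, y) in tem]
--     if r == 1:
--         tem = [(y, 3 - x) for (x, y) in tem]
--     elif r == 2:
--         tem = [(3 - x, 3 - y) for (x, y) in tem]
--     elif r == 3:
--         tem = [(3 - y, x) for (x, y) in tem]
--     return tem
-- ===== Notes on version B (the rewrite author's own statement) =====
-- stated objective: simpler
-- what changed: Replaces the repeated in-place rotation loop (t passes over the list) with a single pass applying the composed rotation for r = t mod 4, chosen by case; the optional flip stays one pass.
import Mathlib
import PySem

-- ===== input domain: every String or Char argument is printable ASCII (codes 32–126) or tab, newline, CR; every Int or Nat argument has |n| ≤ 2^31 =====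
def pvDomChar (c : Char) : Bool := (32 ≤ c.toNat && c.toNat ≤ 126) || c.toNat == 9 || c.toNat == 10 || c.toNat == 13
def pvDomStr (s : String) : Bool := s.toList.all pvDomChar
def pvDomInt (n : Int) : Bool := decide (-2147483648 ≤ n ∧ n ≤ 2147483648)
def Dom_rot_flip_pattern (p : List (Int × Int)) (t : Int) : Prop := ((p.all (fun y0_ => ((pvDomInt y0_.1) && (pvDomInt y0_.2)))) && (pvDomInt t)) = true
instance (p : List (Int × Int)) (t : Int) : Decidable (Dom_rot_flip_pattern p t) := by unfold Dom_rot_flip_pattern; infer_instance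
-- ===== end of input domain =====

-- B applies the composed rotation (t mod 4) in a single pass instead of rotating the list t times; simpler, one pass.
-- (Python A mutates only its local deepcopy, so the caller's list is untouched; return-value equivalence is the whole story.)

-- ===== PORT A =====
def rot_flip_pattern (p : List (Int × Int)) (t : Int) : List (Int × Int) :=
  let st := if t ≥ 4 then (p.map (fun q => (q.1, 3 - q.2)), PySem.Int.mod t 4) else (p, t)
  (PySem.List.pyRange 0 st.2 1).foldl (fun acc _ => acc.map (fun q => (q.2, 3 - q.1))) st.1

-- ===== PORT B =====
def rot_flip_pattern_alt (p : List (Int × Int)) (t : Int) : List (Int × Int) :=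
  let flip := t ≥ 4
  let r : Int := if flip then PySem.Int.mod t 4 else if 0 < t ∧ t < 4 then t else 0
  let tem := if flip then p.map (fun q => (q.1, 3 - q.2)) else p
  if r = 1 then tem.map (fun q => (q.2, 3 - q.1))
  else if r = 2 then tem.map (fun q => (3 - q.1, 3 - q.2))
  else if r = 3 then tem.map (fun q => (3 - q.2, q.1))
  else tem

-- ===== PRECONDITION & SPEC =====
def Spec_rot_flip_pattern (p : List (Int × Int)) (t : Int) (out : List (Int × Int)) : Prop := out = rot_flip_pattern_alt p t
instance (p : List (Int × Int)) (t : Int) (out : List (Int × Int)) : Decidable (Spec_rot_flip_pattern p t out) := by unfold Spec_rot_flip_pattern; infer_instance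

-- ===== CLAIM (what is proved, stated in full; the proofs are below) =====
def Claim_equal_rot_flip_pattern : Prop := ∀ (p : List (Int × Int)) (t : Int), Dom_rot_flip_pattern p t → Spec_rot_flip_pattern p t (rot_flip_pattern p t)

-- ===== LEMMAS AND PROOFS =====

-- Applying the one-step rotation r times (r = 0,1,2,3) to a list equals one map by the composed rotation.
lemma rot_loop_eval (l : List (Int × Int)) (r : Int) (h0 : 0 ≤ r) (h4 : r < 4) :
    (PySem.List.pyRange 0 r 1).foldl (fun acc _ => acc.map (fun q => (q.2, 3 - q.1))) l =
      if r = 1 then l.map (fun q => (q.2, 3 - q.1))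
      else if r = 2 then l.map (fun q => (3 - q.1, 3 - q.2))
      else if r = 3 then l.map (fun q => (3 - q.2, q.1))
      else l := by
  have : r = 0 ∨ r = 1 ∨ r = 2 ∨ r = 3 := by omega
  rcases this with h | h | h | h <;> subst h
  · have : PySem.List.pyRange 0 0 1 = [] := by decide
    simp [this]
  · have : PySem.List.pyRange 0 1 1 = [0] := by decide
    simp [this]
  · have : PySem.List.pyRange 0 2 1 = [0, 1] := by decide
    simp [this, List.foldl, List.map_map, Function.comp]
  · have : PySem.List.pyRange 0 3 1 = [0, 1, 2] := by decide
    simp [this, List.foldl, List.map_map, Function.comp]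

lemma rot_eq_alt (p : List (Int × Int)) (t : Int) :
    rot_flip_pattern p t = rot_flip_pattern_alt p t := by
  by_cases h4 : t ≥ 4
  · have hm0 : 0 ≤ PySem.Int.mod t 4 := PySem.Int.mod_nonneg t (by norm_num)
    have hm4 : PySem.Int.mod t 4 < 4 := PySem.Int.mod_lt t (by norm_num)
    simp only [rot_flip_pattern, rot_flip_pattern_alt, if_pos h4]
    exact rot_loop_eval _ _ hm0 hm4
  · by_cases ht : 0 < t ∧ t < 4
    · simp only [rot_flip_pattern, rot_flip_pattern_alt, if_neg h4, if_pos ht]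
      exact rot_loop_eval _ _ (le_of_lt ht.1) ht.2
    · have hle : t ≤ 0 := by omega
      have : PySem.List.pyRange 0 t 1 = [] := by
        simp [PySem.List.pyRange]; omega
      simp only [rot_flip_pattern, rot_flip_pattern_alt, if_neg h4, if_neg ht, this,
        List.foldl_nil]
      have h1 : (0 : Int) ≠ 1 := by norm_num
      have h2 : (0 : Int) ≠ 2 := by norm_num
      have h3 : (0 : Int) ≠ 3 := by norm_num
      simp [h1, h2, h3]

-- ===== VERDICT (by name: the statement is the Claim_ definition above) =====
theorem rot_flip_pattern_spec : Claim_equal_rot_flip_pattern := by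
  intro p t _
  exact rot_eq_alt p t
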